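-- pv_equiv track=rewrite | github.com/nhargy/Statistical-Mechanics-Weizmann | percolation.py | DFS
-- ===== SOURCE A (Python) =====
-- def DFS(lattice):
--     N = len(lattice[0])
--     path = []
--     great_success = 0
--
--     for i in range(0,N):
--         if lattice[0][i] == 1:
--             path.append([0,i])
--
--     visited = []
--     for pos in path:
--         if pos not in visited:
--             x = pos[0]; y = pos[1]; index = path.index(pos);
--
--             if lattice[N-1][1]==0:
--                 check = N-2
--             else:
--                 check= N-1
--
--             if (x == check):  # or (x == N -2) :
--                 great_success = 1
--                 break
--             visited.append(pos)
--
--             if x != 0: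
--                 if lattice[x-1][y] == 1:
--                     path.insert(index+1,[x-1,y])
--             if lattice[x][(y+1)%N] == 1:
--                 path.insert(index+1,[x,(y+1)%N])
--             if lattice[x][(y-1)%N] == 1:
--                 path.insert(index+1,[x,(y-1)%N])
--             if lattice[x+1][y] == 1:
--                 path.insert(index+1,[x+1,y])
--
--     return great_success
-- ===== SOURCE B (Python) =====
-- def DFS(lattice):
--     N = len(lattice[0])
--     stack = [(0, i) for i in range(N - 1, -1, -1) if lattice[0][i] == 1]
--     if not stack:
--         return 0
--     check = N - 2 if lattice[N - 1][1] == 0 else N - 1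
--     visited = set()
--     while stack:
--         cell = stack.pop()
--         if cell in visited:
--             continue
--         x, y = cell
--         if x == check:
--             return 1
--         visited.add(cell)
--         for a, b in ((x - 1, y), (x, (y + 1) % N), (x, (y - 1) % N), (x + 1, y)):
--             if a >= 0 and lattice[a][b] == 1:
--                 stack.append((a, b))
--     return 0
-- ===== Notes on version B (the rewrite author's own statement) =====
-- stated objective: alternative
-- what changed: Replaces A's iteration over a growing path list (which recomputes list.index(pos) and scans a visited list at every step) by a standard explicit-stack DFS: a seed list comprehension, a set-based visited, and a single loop over a neighbour-candidate tuple with a uniform 'a >= 0' bounds guard instead of four copy-pasted insert branches.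
-- outside the precondition, e.g. on DFS([[1, 0], [1, 1, 1, 0], [1, 1, 0], [-2, 1, 1], [1]]): A returns 1, B returns 1
import Mathlib
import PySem

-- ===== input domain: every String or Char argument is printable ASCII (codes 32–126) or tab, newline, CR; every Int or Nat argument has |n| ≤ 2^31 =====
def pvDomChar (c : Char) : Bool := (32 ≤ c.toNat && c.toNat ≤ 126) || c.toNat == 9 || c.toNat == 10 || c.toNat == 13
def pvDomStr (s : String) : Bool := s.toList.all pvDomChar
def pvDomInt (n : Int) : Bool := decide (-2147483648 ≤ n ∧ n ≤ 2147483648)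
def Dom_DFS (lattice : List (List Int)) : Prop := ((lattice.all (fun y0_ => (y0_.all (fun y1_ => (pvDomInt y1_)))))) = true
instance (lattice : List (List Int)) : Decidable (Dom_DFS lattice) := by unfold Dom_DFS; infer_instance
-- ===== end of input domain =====

-- B replaces A's growing-path iteration (list.index + visited-list scans) by an explicit-stack
-- DFS whose neighbours come from one candidate-tuple loop; equality of the RETURN value on Pre_.

-- lattice[x][y] with a default; inside Pre_DFS every access the Python performs is in range, so this is exact there
def pvAt (lattice : List (List Int)) (x y : Int) : Int :=
  PySem.List.pyGetD (PySem.List.pyGetD lattice x []) y 0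

-- ===== PORT A =====
-- the four conditional 'path.insert(index+1, …)' statements of A's loop body
def pvExpandA (lattice : List (List Int)) (N : Int) (path : List (Int × Int))
    (index : Nat) (x y : Int) : List (Int × Int) :=
  let path1 := if x ≠ 0 ∧ pvAt lattice (x - 1) y = 1 then
    PySem.List.insert path ((index : Int) + 1) (x - 1, y) else path
  let path2 := if pvAt lattice x (PySem.Int.mod (y + 1) N) = 1 then
    PySem.List.insert path1 ((index : Int) + 1) (x, PySem.Int.mod (y + 1) N) else path1
  let path3 := if pvAt lattice x (PySem.Int.mod (y - 1) N) = 1 then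
    PySem.List.insert path2 ((index : Int) + 1) (x, PySem.Int.mod (y - 1) N) else path2
  if pvAt lattice (x + 1) y = 1 then
    PySem.List.insert path3 ((index : Int) + 1) (x + 1, y) else path3

-- A's 'for pos in path' loop over the mutating list: pointer k over path, fuel bounds the iterations
def pvGoA (lattice : List (List Int)) (N : Int) :
    Nat → List (Int × Int) → Nat → List (Int × Int) → Int
  | 0, _, _, _ => 0
  | fuel + 1, path, k, visited =>
    match path[k]? with
    | none => 0
    | some pos =>
      if pos ∈ visited then
        pvGoA lattice N fuel path (k + 1) visited
      else
        let index : Nat := (PySem.List.index? path pos).getD 0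
        let check : Int := if pvAt lattice (N - 1) 1 = 0 then N - 2 else N - 1
        if pos.1 = check then 1
        else
          pvGoA lattice N fuel (pvExpandA lattice N path index pos.1 pos.2) (k + 1)
            (visited ++ [pos])

def DFS (lattice : List (List Int)) : Int :=
  let N : Int := ((PySem.List.pyGetD lattice 0 []).length : Int)
  let path : List (Int × Int) :=
    (PySem.List.pyRange 0 N 1).foldl
      (fun p i => if pvAt lattice 0 i = 1 then p ++ [((0 : Int), i)] else p) []
  pvGoA lattice N (N.toNat + 4 * N.toNat * N.toNat + 1) path 0 []

-- ===== PORT B =====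
-- Source B's candidate tuple ((x-1,y), (x,(y+1)%N), (x,(y-1)%N), (x+1,y))
def pvNbrs (N x y : Int) : List (Int × Int) :=
  [(x - 1, y), (x, PySem.Int.mod (y + 1) N), (x, PySem.Int.mod (y - 1) N), (x + 1, y)]

-- Source B's 'for a, b in …: if a >= 0 and lattice[a][b] == 1: stack.append((a, b))'
-- (Lean stacks are head-topped, so an append is a cons)
def pvPush (lattice : List (List Int)) (N : Int) (stack : List (Int × Int))
    (x y : Int) : List (Int × Int) :=
  (pvNbrs N x y).foldl
    (fun s c => if 0 ≤ c.1 ∧ pvAt lattice c.1 c.2 = 1 then c :: s else s) stack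

-- Source B's 'while stack' with cell = stack.pop(); visited is a PySem.Set
def pvRun (lattice : List (List Int)) (N check : Int) :
    Nat → List (Int × Int) → PySem.Set (Int × Int) → Int
  | 0, _, _ => 0
  | _ + 1, [], _ => 0
  | fuel + 1, cell :: stack, visited =>
    if cell ∈ visited then pvRun lattice N check fuel stack visited
    else if cell.1 = check then 1
    else pvRun lattice N check fuel (pvPush lattice N stack cell.1 cell.2)
      (PySem.Set.add visited cell)

-- the comprehension builds the Python stack bottom-to-top; head-topped here, hence '.reverse'
def DFS_alt (lattice : List (List Int)) : Int :=
  let N : Int := ((PySem.List.pyGetD lattice 0 []).length : Int)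
  let stack : List (Int × Int) :=
    (((PySem.List.pyRange (N - 1) (-1) (-1)).filter
        (fun i => decide (pvAt lattice 0 i = 1))).map (fun i => ((0 : Int), i))).reverse
  if stack = [] then 0
  else
    let check : Int := if pvAt lattice (N - 1) 1 = 0 then N - 2 else N - 1
    pvRun lattice N check (N.toNat * (4 * N.toNat + 1) + 1) stack PySem.Set.empty

-- ===== PRECONDITION & SPEC =====
-- Pre_ admits lattices whose top row contains no 1 (A returns 0 before indexing anything else) and
-- square N×N lattices with N ≥ 2; on other (ragged / too small) inputs A's index accesses may raise
-- IndexError depending on the traversal path, so they are excluded.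
def Pre_DFS (lattice : List (List Int)) : Prop :=
  (lattice ≠ [] ∧ ∀ v ∈ lattice.headD [], v ≠ 1) ∨
  (2 ≤ (lattice.headD []).length ∧ lattice.length = (lattice.headD []).length ∧
    ∀ row ∈ lattice, row.length = (lattice.headD []).length)
instance (lattice : List (List Int)) : Decidable (Pre_DFS lattice) := by
  unfold Pre_DFS; infer_instance

def pvWitness_DFS : List (List Int) := [[1, 0], [1, 1]]

def Spec_DFS (lattice : List (List Int)) (out : Int) : Prop := out = DFS_alt lattice
instance (lattice : List (List Int)) (out : Int) : Decidable (Spec_DFS lattice out) := by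
  unfold Spec_DFS; infer_instance

-- ===== CLAIM (what is proved, stated in full; the proofs are below) =====
def Claim_equal_DFS : Prop :=
  ∀ (lattice : List (List Int)), Dom_DFS lattice → Pre_DFS lattice → Spec_DFS lattice (DFS lattice)

-- ===== LEMMAS AND PROOFS =====

lemma pvFoldlAppendIf {β : Type} (p : Int → Prop) [DecidablePred p] (f : Int → β) :
    ∀ (l : List Int) (init : List β),
      l.foldl (fun acc i => if p i then acc ++ [f i] else acc) init =
        init ++ (l.filter (fun i => decide (p i))).map f := by
  intro l
  induction l with
  | nil => simp
  | cons a l ih => intro init; by_cases h : p a <;> simp [h, ih]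

-- B's reversed-range comprehension (reversed again for the head-topped stack) = A's forward seeding
lemma pvSeeds (lattice : List (List Int)) (N : Int) :
    (((PySem.List.pyRange (N - 1) (-1) (-1)).filter
        (fun i => decide (pvAt lattice 0 i = 1))).map (fun i => ((0 : Int), i))).reverse =
      (PySem.List.pyRange 0 N 1).foldl
        (fun p i => if pvAt lattice 0 i = 1 then p ++ [((0 : Int), i)] else p) [] := by
  have hrev : PySem.List.pyRange (N - 1) (-1) (-1) = (PySem.List.pyRange 0 N 1).reverse := by
    rw [PySem.List.pyRange_neg_one_eq_reverse]; norm_num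
  rw [hrev, pvFoldlAppendIf (fun i => pvAt lattice 0 i = 1), List.nil_append,
    List.filter_reverse, List.map_reverse, List.reverse_reverse]

-- anything in the pushed stack is an old element or satisfies the push guard
lemma pvMemPush (lattice : List (List Int)) :
    ∀ (l stack : List (Int × Int)) (c : Int × Int),
      c ∈ l.foldl (fun s d => if 0 ≤ d.1 ∧ pvAt lattice d.1 d.2 = 1 then d :: s else s) stack →
      c ∈ stack ∨ 0 ≤ c.1 := by
  intro l
  induction l with
  | nil => intro stack c hc; exact Or.inl hc
  | cons a l ih =>
    intro stack c hc
    simp only [List.foldl_cons] at hc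
    by_cases ha : 0 ≤ a.1 ∧ pvAt lattice a.1 a.2 = 1
    · rw [if_pos ha] at hc
      rcases ih (a :: stack) c hc with hm | hx
      · rcases List.mem_cons.mp hm with he | hm
        · exact Or.inr (he ▸ ha.1)
        · exact Or.inl hm
      · exact Or.inr hx
    · rw [if_neg ha] at hc
      exact ih stack c hc

-- when all elements before position k are visited and pos is not, path.index(pos) = k
lemma pvIndexEq (path visited : List (Int × Int)) (k : Nat) (pos : Int × Int)
    (hk : k < path.length) (hpos : path[k] = pos)
    (hinv : ∀ j (_hj : j < k) (_hjl : j < path.length), path[j] ∈ visited)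
    (hnv : pos ∉ visited) :
    PySem.List.index? path pos = some k := by
  rw [PySem.List.index?_eq_some_iff]
  refine ⟨path.take k, path.drop (k + 1), ?_, by simp [Nat.min_eq_left (Nat.le_of_lt hk)], ?_⟩
  · conv_lhs => rw [← List.take_append_drop k path]
    rw [List.drop_eq_getElem_cons hk, hpos]
  · intro hmem
    obtain ⟨j, hj, hje⟩ := List.mem_iff_getElem.mp hmem
    have hjk : j < k := lt_of_lt_of_le hj (by simp)
    have hgt : path[j]'(lt_trans hjk hk) = pos := by
      rw [← hje]; simp [List.getElem_take]
    exact hnv (hgt ▸ hinv j hjk (lt_trans hjk hk))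

-- A's four inserts at index+1 behind a prefix of length index+1 = B's candidate-loop pushes
lemma pvExpand_eq (lattice : List (List Int)) (N : Int) (P rest : List (Int × Int))
    (index : Nat) (x y : Int) (hx : 0 ≤ x) (hP : P.length = index + 1) :
    pvExpandA lattice N (P ++ rest) index x y = P ++ pvPush lattice N rest x y := by
  have hins : ∀ (t : List (Int × Int)) (v : Int × Int),
      PySem.List.insert (P ++ t) ((index : Int) + 1) v = P ++ v :: t := by
    intro t v
    have hcast : ((index : Int) + 1) = ((P.length : Nat) : Int) := by rw [hP]; push_cast; ring
    rw [hcast, PySem.List.insert_natCast _ _ _ (by simp), List.take_left, List.drop_left]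
  have e1 : (0 ≤ x - 1 ∧ pvAt lattice (x - 1) y = 1) =
      (x ≠ 0 ∧ pvAt lattice (x - 1) y = 1) := by
    apply propext; constructor <;> rintro ⟨h1, h2⟩ <;> exact ⟨by omega, h2⟩
  have e2 : (0 ≤ x) = True := by simp [hx]
  have e3 : (0 ≤ x + 1) = True := by simp; omega
  unfold pvExpandA pvPush pvNbrs
  simp only [List.foldl_cons, List.foldl_nil, e1, e2, e3, true_and]
  split_ifs <;> simp only [hins]

-- the two loops run in lockstep: B's stack is A's path from the pointer on
lemma pvLockstep (lattice : List (List Int)) (N : Int) :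
    ∀ (fuel : Nat) (path : List (Int × Int)) (k : Nat) (visited : List (Int × Int)),
      (∀ j (_hj : j < k) (_hjl : j < path.length), path[j] ∈ visited) →
      (∀ c ∈ path, 0 ≤ c.1) →
      pvGoA lattice N fuel path k visited =
        pvRun lattice N (if pvAt lattice (N - 1) 1 = 0 then N - 2 else N - 1) fuel
          (path.drop k) visited := by
  intro fuel
  induction fuel with
  | zero => intro path k visited _ _; simp [pvGoA, pvRun]
  | succ fuel ih =>
    intro path k visited hinv hnn
    rcases h : path[k]? with _ | pos
    · have hge : path.length ≤ k := by simpa using List.getElem?_eq_none_iff.mp h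
      simp [pvGoA, pvRun, h, List.drop_eq_nil_iff.mpr hge]
    · have hk : k < path.length := by
        by_contra hc
        simp [List.getElem?_eq_none_iff.mpr (Nat.le_of_not_lt hc)] at h
      have hpos : path[k] = pos := by
        have := List.getElem?_eq_getElem hk
        rw [h] at this
        exact (Option.some.inj this).symm
      have hdrop : path.drop k = pos :: path.drop (k + 1) := by
        rw [List.drop_eq_getElem_cons hk, hpos]
      obtain ⟨x, y⟩ := pos
      have hx : 0 ≤ x := hnn (x, y) (hpos ▸ List.getElem_mem hk)
      by_cases hv : (x, y) ∈ visited
      · rw [hdrop]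
        simp only [pvGoA, pvRun, h, hv, if_pos]
        exact ih path (k + 1) visited (by
          intro j hj hjl
          rcases Nat.lt_or_ge j k with hjk | hjk
          · exact hinv j hjk hjl
          · have hje : j = k := by omega
            subst hje; rw [hpos]; exact hv) hnn
      · have hidx : (PySem.List.index? path (x, y)).getD 0 = k := by
          rw [pvIndexEq path visited k (x, y) hk hpos hinv hv]; rfl
        by_cases hc : x = (if pvAt lattice (N - 1) 1 = 0 then N - 2 else N - 1)
        · rw [hdrop]
          simp only [pvGoA, pvRun, h]
          rw [if_neg hv, if_neg hv, if_pos hc, if_pos hc]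
        · set P := path.take (k + 1) with hPdef
          have hP : P.length = k + 1 := by
            simp [hPdef, Nat.min_eq_left (Nat.succ_le_of_lt hk)]
          have hsplit : path = P ++ path.drop (k + 1) := (List.take_append_drop (k + 1) path).symm
          have hvis : PySem.Set.add visited (x, y) = visited ++ [(x, y)] :=
            PySem.Set.add_of_not_mem hv
          have hA : pvGoA lattice N (fuel + 1) path k visited =
              pvGoA lattice N fuel (pvExpandA lattice N path k x y) (k + 1)
                (visited ++ [(x, y)]) := by
            simp only [pvGoA, h, hidx]
            rw [if_neg hv, if_neg hc]
          have hB : pvRun lattice N (if pvAt lattice (N - 1) 1 = 0 then N - 2 else N - 1)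
                (fuel + 1) (path.drop k) visited =
              pvRun lattice N (if pvAt lattice (N - 1) 1 = 0 then N - 2 else N - 1) fuel
                (pvPush lattice N (path.drop (k + 1)) x y) (visited ++ [(x, y)]) := by
            rw [hdrop]
            simp only [pvRun]
            rw [if_neg hv, if_neg hc, hvis]
          have hexp : pvExpandA lattice N path k x y =
              P ++ pvPush lattice N (path.drop (k + 1)) x y := by
            conv_lhs => rw [hsplit]
            exact pvExpand_eq lattice N P (path.drop (k + 1)) k x y hx hP
          have hdrop2 : (P ++ pvPush lattice N (path.drop (k + 1)) x y).drop (k + 1) =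
              pvPush lattice N (path.drop (k + 1)) x y := by
            rw [← hP, List.drop_left]
          have hinv' : ∀ j (hj : j < k + 1)
              (hjl : j < (P ++ pvPush lattice N (path.drop (k + 1)) x y).length),
              (P ++ pvPush lattice N (path.drop (k + 1)) x y)[j] ∈ visited ++ [(x, y)] := by
            intro j hj hjl
            have hjP : j < P.length := by omega
            rw [List.getElem_append_left hjP]
            have hgl : P[j]'hjP = path[j]'(by omega) := by
              simp [hPdef, List.getElem_take]
            rw [hgl]
            rcases Nat.lt_or_ge j k with hjk | hjk
            · exact List.mem_append_left _ (hinv j hjk (by omega))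
            · have hje : j = k := by omega
              subst hje
              rw [hpos]
              exact List.mem_append_right _ (List.mem_singleton.mpr rfl)
          have hnn' : ∀ c ∈ P ++ pvPush lattice N (path.drop (k + 1)) x y, 0 ≤ c.1 := by
            intro c hcmem
            rcases List.mem_append.mp hcmem with hcP | hcp
            · exact hnn c (hsplit ▸ List.mem_append_left _ hcP)
            · rcases pvMemPush lattice _ _ c hcp with hcr | hcx
              · exact hnn c (hsplit ▸ List.mem_append_right _ hcr)
              · exact hcx
          have hIH := ih (P ++ pvPush lattice N (path.drop (k + 1)) x y) (k + 1)
            (visited ++ [(x, y)]) hinv' hnn'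
          rw [hdrop2] at hIH
          rw [hA, hB, hexp]
          exact hIH

-- an empty path ends A's loop at once, whatever the fuel
lemma pvGoA_nil (lattice : List (List Int)) (N : Int) (fuel : Nat) :
    pvGoA lattice N fuel [] 0 [] = 0 := by
  cases fuel <;> simp [pvGoA]

-- seeds have nonnegative row index
lemma pvSeedsNonneg (lattice : List (List Int)) (N : Int) :
    ∀ c ∈ (PySem.List.pyRange 0 N 1).foldl
      (fun p i => if pvAt lattice 0 i = 1 then p ++ [((0 : Int), i)] else p)
      ([] : List (Int × Int)), 0 ≤ c.1 := by
  intro c hc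
  rw [pvFoldlAppendIf (fun i => pvAt lattice 0 i = 1), List.nil_append] at hc
  obtain ⟨i, _, hi⟩ := List.mem_map.mp hc
  simp [← hi]

-- ===== VERDICT (by name: the statement is the Claim_ definition above) =====
theorem DFS_spec : Claim_equal_DFS := by
  intro lattice _dom _pre
  show DFS lattice = DFS_alt lattice
  simp only [DFS, DFS_alt]
  rw [pvSeeds]
  set N : Int := ((PySem.List.pyGetD lattice 0 []).length : Int) with hN
  generalize hseeds : ((PySem.List.pyRange 0 N 1).foldl
      (fun p i => if pvAt lattice 0 i = 1 then p ++ [((0 : Int), i)] else p) [] :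
      List (Int × Int)) = seeds
  by_cases hnil : seeds = []
  · rw [if_pos hnil, hnil, pvGoA_nil]
  · rw [if_neg hnil]
    have hfuel : N.toNat + 4 * N.toNat * N.toNat + 1 = N.toNat * (4 * N.toNat + 1) + 1 := by ring
    rw [hfuel]
    exact pvLockstep lattice N (N.toNat * (4 * N.toNat + 1) + 1) seeds 0 []
      (by intro j hj _; omega) (hseeds ▸ pvSeedsNonneg lattice N)
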